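-- pv_equiv track=rewrite | github.com/STARC00KIE/coding_study | 프로그래머스/2/42586. 기능개발/기능개발.py | solution
-- ===== SOURCE A (Python) =====
-- def solution(progresses, speeds):
--     answer = []
--     left = []
--
--     # 각 작업의 남은 일수를 계산
--     for p, s in zip(progresses, speeds):
--         days_left = (100 - p) // s if (100 - p) % s == 0 else (100 - p) // s + 1
--         left.append(days_left)
--
--     # 배포 날짜와 배포 개수 초기화
--     current_release_day = left[0]
--     cnt = 0
--
--     for days in left:
--         if days <= current_release_day:
--             cnt += 1
--         else:
--             answer.append(cnt)
--             cnt = 1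
--             current_release_day = days
--
--     # 마지막 배포 개수를 추가
--     answer.append(cnt)
--
--     return answer
-- ===== SOURCE B (Python) =====
-- def solution(progresses, speeds):
--     days = [(100 - p) // s if (100 - p) % s == 0 else (100 - p) // s + 1
--             for p, s in zip(progresses, speeds)]
--
--     def groups(rest):
--         if not rest:
--             return []
--         head = rest[0]
--         k = 1
--         while k < len(rest) and rest[k] <= head:
--             k += 1
--         return [k] + groups(rest[k:])
--
--     return groups(days)
-- ===== Notes on version B (the rewrite author's own statement) =====
-- stated objective: alternative
-- what changed: Replaced A's single accumulator fold (answer list, running counter, threshold variable) by a recursive grouping that, for each group, counts the run of following jobs finishing no later than the group's head and recurses on the remainder, so each group's size is obtained by run-length counting rather than counter resets.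
import Mathlib
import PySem

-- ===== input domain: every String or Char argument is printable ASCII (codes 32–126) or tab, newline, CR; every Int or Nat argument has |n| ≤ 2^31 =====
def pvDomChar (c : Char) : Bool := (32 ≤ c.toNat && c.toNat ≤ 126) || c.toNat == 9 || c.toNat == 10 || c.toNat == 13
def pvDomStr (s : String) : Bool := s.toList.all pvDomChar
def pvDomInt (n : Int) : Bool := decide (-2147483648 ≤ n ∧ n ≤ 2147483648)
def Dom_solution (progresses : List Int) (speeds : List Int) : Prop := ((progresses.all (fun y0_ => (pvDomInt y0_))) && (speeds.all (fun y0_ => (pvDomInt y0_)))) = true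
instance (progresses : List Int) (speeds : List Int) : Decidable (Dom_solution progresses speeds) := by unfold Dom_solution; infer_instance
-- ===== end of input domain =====

-- B replaces A's counter/threshold fold by recursive run-length grouping (alternative decomposition, same cost).

-- ===== PORT A =====
-- days_left ceiling expression of A
def pvDaysA (x : Int × Int) : Int :=
  if PySem.Int.mod (100 - x.1) x.2 = 0 then PySem.Int.floordiv (100 - x.1) x.2
  else PySem.Int.floordiv (100 - x.1) x.2 + 1

-- one iteration of A's second loop over state (answer, cnt, current_release_day)
def pvStepA (st : List Int × Int × Int) (days : Int) : List Int × Int × Int :=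
  if days ≤ st.2.2 then (st.1, st.2.1 + 1, st.2.2)
  else (st.1 ++ [st.2.1], 1, days)

def solution (progresses : List Int) (speeds : List Int) : List Int :=
  let left := (progresses.zip speeds).map pvDaysA
  match left with
  | [] => []  -- Python raises IndexError at left[0]; excluded by Pre_solution
  | d0 :: _ =>
    let st := left.foldl pvStepA ([], 0, d0)
    st.1 ++ [st.2.1]

-- ===== PORT B =====
-- days ceiling expression of B (same formula as A's, per Source B)
def pvDaysB (x : Int × Int) : Int :=
  if PySem.Int.mod (100 - x.1) x.2 = 0 then PySem.Int.floordiv (100 - x.1) x.2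
  else PySem.Int.floordiv (100 - x.1) x.2 + 1

-- B's inner while loop: number of leading elements ≤ head (k minus its initial 1)
def pvRunLe (head : Int) : List Int → Nat
  | [] => 0
  | x :: xs => if x ≤ head then pvRunLe head xs + 1 else 0

-- B's recursive groups with a structural fuel bound (fuel = length, never exhausted):
-- emit k = 1 + run, recurse on rest[k:]
def pvGroupsF : Nat → List Int → List Int
  | _, [] => []
  | 0, _ :: _ => []  -- fuel exhausted: unreachable, fuel starts at the list's length
  | fuel + 1, d :: rest =>
    let k := 1 + pvRunLe d rest
    ((k : Nat) : Int) :: pvGroupsF fuel ((d :: rest).drop k)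

def pvGroups (l : List Int) : List Int := pvGroupsF l.length l

def solution_alt (progresses : List Int) (speeds : List Int) : List Int :=
  pvGroups ((progresses.zip speeds).map pvDaysB)

-- ===== PRECONDITION & SPEC =====
-- Pre_ excludes the inputs on which Python A raises: an empty zip (IndexError at left[0])
-- and a zipped speed of 0 (ZeroDivisionError in the ceiling expression).
def Pre_solution (progresses : List Int) (speeds : List Int) : Prop :=
  progresses ≠ [] ∧ speeds ≠ [] ∧ ∀ x ∈ progresses.zip speeds, x.2 ≠ 0
instance (progresses : List Int) (speeds : List Int) : Decidable (Pre_solution progresses speeds) := by unfold Pre_solution; infer_instance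
def pvWitness_solution : List Int × List Int := ([30, 95], [5, 4])

def Spec_solution (progresses : List Int) (speeds : List Int) (out : List Int) : Prop := out = solution_alt progresses speeds
instance (progresses : List Int) (speeds : List Int) (out : List Int) : Decidable (Spec_solution progresses speeds out) := by unfold Spec_solution; infer_instance

-- ===== CLAIM (what is proved, stated in full; the proofs are below) =====
def Claim_equal_solution : Prop := ∀ (progresses : List Int) (speeds : List Int), Dom_solution progresses speeds → Pre_solution progresses speeds → Spec_solution progresses speeds (solution progresses speeds)

-- ===== LEMMAS AND PROOFS =====

theorem pvDays_eq : pvDaysA = pvDaysB := rfl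

theorem pvGroupsF_high (fuel : Nat) : ∀ (l : List Int), l.length ≤ fuel → pvGroupsF fuel l = pvGroups l := by
  induction fuel using Nat.strong_induction_on with
  | _ fuel ih =>
    intro l hl
    cases l with
    | nil => cases fuel <;> rfl
    | cons d rest =>
      cases fuel with
      | zero => simp at hl
      | succ n =>
        simp only [List.length_cons, Nat.succ_le_succ_iff] at hl
        have hx : (List.drop (1 + pvRunLe d rest) (d :: rest)).length ≤ rest.length := by
          simp only [List.length_drop, List.length_cons]; omega
        show pvGroupsF (n + 1) (d :: rest) = pvGroupsF (d :: rest).length (d :: rest)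
        simp only [pvGroupsF, List.length_cons]
        rw [ih n (Nat.lt_succ_self n) _ (le_trans hx hl),
            ih rest.length (Nat.lt_succ_of_le hl) _ hx]

theorem pvGroups_cons (d : Int) (rest : List Int) :
    pvGroups (d :: rest) = ((1 + pvRunLe d rest : Nat) : Int) :: pvGroups (rest.drop (pvRunLe d rest)) := by
  have hdrop : (d :: rest).drop (1 + pvRunLe d rest) = rest.drop (pvRunLe d rest) := by
    rw [Nat.add_comm, List.drop_succ_cons]
  show pvGroupsF (rest.length + 1) (d :: rest) = _
  simp only [pvGroupsF, hdrop]
  rw [pvGroupsF_high _ _ (by simp only [List.length_drop]; omega)]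

-- the invariant connecting A's fold (mid-group with counter cnt, threshold d) to B's grouping
theorem pvFold_eq_groups (rest : List Int) (ans : List Int) (cnt : Int) (d : Int) :
    (rest.foldl pvStepA (ans, cnt, d)).1 ++ [(rest.foldl pvStepA (ans, cnt, d)).2.1]
      = ans ++ (cnt + (pvRunLe d rest : Int)) :: pvGroups (rest.drop (pvRunLe d rest)) := by
  induction rest generalizing ans cnt d with
  | nil => simp [pvRunLe, pvGroups, pvGroupsF]
  | cons x xs ih =>
    by_cases hx : x ≤ d
    · have h1 : pvRunLe d (x :: xs) = pvRunLe d xs + 1 := by simp [pvRunLe, hx]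
      simp only [List.foldl_cons, pvStepA, if_pos hx, h1, List.drop_succ_cons]
      rw [ih]
      push_cast
      ring_nf
    · have h0 : pvRunLe d (x :: xs) = 0 := by simp [pvRunLe, hx]
      simp only [List.foldl_cons, pvStepA, if_neg hx, h0]
      rw [ih, List.drop_zero, pvGroups_cons]
      push_cast
      simp

-- ===== VERDICT (by name: the statement is the Claim_ definition above) =====
theorem solution_spec : Claim_equal_solution := by
  intro progresses speeds _ hpre
  unfold Spec_solution solution solution_alt
  obtain ⟨hp, hs, _⟩ := hpre
  cases hz : progresses.zip speeds with
  | nil =>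
    exfalso
    cases progresses with
    | nil => exact hp rfl
    | cons a t =>
      cases speeds with
      | nil => exact hs rfl
      | cons b u => simp at hz
  | cons a t =>
    simp only [List.map_cons]
    rw [← pvDays_eq]
    have hstep : pvStepA ([], 0, pvDaysA a) (pvDaysA a) = ([], 1, pvDaysA a) := by
      simp [pvStepA]
    rw [List.foldl_cons, hstep, pvFold_eq_groups, pvGroups_cons]
    push_cast
    simp
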